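-- pv_equiv track=rewrite | github.com/Sanjeevan1998/dfacto | dfacto_backend/agents/worker_social.py | _keyword_stance
-- ===== SOURCE A (Python) =====
-- _FALSE_HINTS = {
--     "false", "debunked", "misinformation", "misleading", "hoax",
--     "myth", "fake", "incorrect", "fabricated", "no evidence",
-- }
--
-- _TRUE_HINTS = {
--     "true", "confirmed", "verified", "accurate", "correct",
--     "real", "legit", "proven", "evidence shows",
-- }
--
-- def _keyword_stance(text: str) -> str:
--     t = text.lower()
--     false_score = sum(1 for kw in _FALSE_HINTS if kw in t)
--     true_score = sum(1 for kw in _TRUE_HINTS if kw in t)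
--     if false_score > true_score:
--         return "contradict"
--     if true_score > false_score:
--         return "support"
--     return "neutral"
-- ===== SOURCE B (Python) =====
-- _FALSE_KWS = ("false", "debunked", "misinformation", "misleading", "hoax",
--               "myth", "fake", "incorrect", "fabricated", "no evidence")
--
-- _TRUE_KWS = ("true", "confirmed", "verified", "accurate", "correct",
--              "real", "legit", "proven", "evidence shows")
--
--
-- def _keyword_stance(text: str) -> str:
--     t = text.lower()
--     # position-driven multi-pattern scan: walk the text once and collect,
--     # at each position, every keyword that starts there
--     found = set()
--     for i in range(len(t)):
--         for kw in _FALSE_KWS + _TRUE_KWS: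
--             if t.startswith(kw, i):
--                 found.add(kw)
--     f = len(found & set(_FALSE_KWS))
--     s = len(found & set(_TRUE_KWS))
--     if f > s:
--         return "contradict"
--     if s > f:
--         return "support"
--     return "neutral"
-- ===== Notes on version B (the rewrite author's own statement) =====
-- stated objective: alternative
-- what changed: Instead of A's per-keyword substring containment tests with two counts, B scans the text position by position, collecting every keyword that starts at each position into a found-set via prefix matching, then classifies by the sizes of the found-set's intersections with the false- and true-hint sets.
import Mathlib
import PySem

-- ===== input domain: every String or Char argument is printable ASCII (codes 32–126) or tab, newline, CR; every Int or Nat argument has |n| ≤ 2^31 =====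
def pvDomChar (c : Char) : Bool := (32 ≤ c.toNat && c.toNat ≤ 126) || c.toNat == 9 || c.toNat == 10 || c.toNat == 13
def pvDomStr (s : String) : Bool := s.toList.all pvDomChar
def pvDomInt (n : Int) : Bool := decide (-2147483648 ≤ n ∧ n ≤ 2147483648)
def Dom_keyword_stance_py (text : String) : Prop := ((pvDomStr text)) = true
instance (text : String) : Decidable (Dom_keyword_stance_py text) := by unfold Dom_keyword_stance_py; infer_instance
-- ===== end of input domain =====

-- B replaces A's per-keyword substring tests by a position-driven scan of the text that collects every keyword matching at each position into a set, then classifies by set-intersection sizes (alternative decomposition, same cost).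


-- ===== PORT A =====
def falseHintsA : PySem.Set String := PySem.Set.ofList
  ["false", "debunked", "misinformation", "misleading", "hoax",
   "myth", "fake", "incorrect", "fabricated", "no evidence"]

def trueHintsA : PySem.Set String := PySem.Set.ofList
  ["true", "confirmed", "verified", "accurate", "correct",
   "real", "legit", "proven", "evidence shows"]

def keyword_stance_py (text : String) : String :=
  let t := PySem.Str.lower text
  let false_score : Int := falseHintsA.foldl (fun acc kw => acc + if PySem.Str.isIn kw t then 1 else 0) 0
  let true_score : Int := trueHintsA.foldl (fun acc kw => acc + if PySem.Str.isIn kw t then 1 else 0) 0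
  if false_score > true_score then "contradict"
  else if true_score > false_score then "support"
  else "neutral"

-- ===== PORT B =====
def falseKwsB : List String :=
  ["false", "debunked", "misinformation", "misleading", "hoax",
   "myth", "fake", "incorrect", "fabricated", "no evidence"]

def trueKwsB : List String :=
  ["true", "confirmed", "verified", "accurate", "correct",
   "real", "legit", "proven", "evidence shows"]

-- the inner 'for kw in _FALSE_KWS + _TRUE_KWS: if t.startswith(kw, i): found.add(kw)';
-- Python's t.startswith(kw, i) with 0 ≤ i ≤ len(t) is exactly Chars.startswith on (t.toList.drop i)
def foundStepB (tl : List Char) (fs : PySem.Set String) (i : Nat) : PySem.Set String :=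
  (falseKwsB ++ trueKwsB).foldl
    (fun fs kw => if PySem.Chars.startswith (tl.drop i) kw.toList then PySem.Set.add fs kw else fs) fs

-- 'found = set(); for i in range(len(t)): …'  (range(n) ported as List.range n)
def foundB (tl : List Char) : PySem.Set String :=
  (List.range tl.length).foldl (foundStepB tl) PySem.Set.empty

def keyword_stance_py_alt (text : String) : String :=
  let t := PySem.Str.lower text
  let found := foundB t.toList
  let f := PySem.Set.len (PySem.Set.inter found (PySem.Set.ofList falseKwsB))
  let s := PySem.Set.len (PySem.Set.inter found (PySem.Set.ofList trueKwsB))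
  if f > s then "contradict"
  else if s > f then "support"
  else "neutral"

-- ===== PRECONDITION & SPEC =====
def Spec_keyword_stance_py (text : String) (out : String) : Prop := out = keyword_stance_py_alt text
instance (text : String) (out : String) : Decidable (Spec_keyword_stance_py text out) := by unfold Spec_keyword_stance_py; infer_instance

-- ===== CLAIM (what is proved, stated in full; the proofs are below) =====
def Claim_equal_keyword_stance_py : Prop := ∀ (text : String), Dom_keyword_stance_py text → Spec_keyword_stance_py text (keyword_stance_py text)

-- ===== LEMMAS AND PROOFS =====

-- generic: membership after folding 'if P kw: fs.add(kw)' over a keyword list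
lemma mem_foldl_add_if {α : Type} [BEq α] [LawfulBEq α] (P : α → Bool) (y : α) :
    ∀ (l : List α) (fs : PySem.Set α),
      y ∈ l.foldl (fun fs kw => if P kw then PySem.Set.add fs kw else fs) fs ↔
        y ∈ fs ∨ (y ∈ l ∧ P y) := by
  intro l
  induction l with
  | nil => simp
  | cons x xs ih =>
    intro fs
    simp only [List.foldl_cons, ih, List.mem_cons]
    by_cases hx : P x = true
    · simp only [hx, if_true, PySem.Set.mem_add]
      constructor
      · rintro ((h | rfl) | h) <;> tauto
      · rintro (h | ⟨(rfl | h), hp⟩) <;> tauto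
    · simp only [hx]
      constructor
      · rintro (h | h) <;> tauto
      · rintro (h | ⟨(rfl | h), hp⟩)
        · tauto
        · exact absurd hp hx
        · tauto

lemma mem_foundStep (tl : List Char) (fs : PySem.Set String) (i : Nat) (y : String) :
    y ∈ foundStepB tl fs i ↔
      y ∈ fs ∨ (y ∈ falseKwsB ++ trueKwsB ∧ PySem.Chars.startswith (tl.drop i) y.toList) := by
  exact mem_foldl_add_if _ y _ fs

lemma mem_foundB_aux (tl : List Char) (y : String) :
    ∀ (L : List Nat) (fs : PySem.Set String),
      y ∈ L.foldl (foundStepB tl) fs ↔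
        y ∈ fs ∨ (y ∈ falseKwsB ++ trueKwsB ∧ ∃ i ∈ L, PySem.Chars.startswith (tl.drop i) y.toList) := by
  intro L
  induction L with
  | nil => simp
  | cons j L ih =>
    intro fs
    simp only [List.foldl_cons, ih, mem_foundStep, List.mem_cons]
    constructor
    · rintro ((h | ⟨hk, hp⟩) | ⟨hk, i, hi, hp⟩)
      · tauto
      · exact Or.inr ⟨hk, j, Or.inl rfl, hp⟩
      · exact Or.inr ⟨hk, i, Or.inr hi, hp⟩
    · rintro (h | ⟨hk, i, (rfl | hi), hp⟩)
      · tauto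
      · exact Or.inl (Or.inr ⟨hk, hp⟩)
      · exact Or.inr ⟨hk, i, hi, hp⟩

lemma mem_foundB (tl : List Char) (y : String) :
    y ∈ foundB tl ↔
      y ∈ falseKwsB ++ trueKwsB ∧ ∃ i < tl.length, PySem.Chars.startswith (tl.drop i) y.toList := by
  unfold foundB
  rw [mem_foundB_aux]
  simp [PySem.Set.empty, List.mem_range]

lemma nodup_foldl_step (tl : List Char) :
    ∀ (L : List Nat) (fs : PySem.Set String), fs.Nodup → (L.foldl (foundStepB tl) fs).Nodup := by
  intro L
  induction L with
  | nil => exact fun fs h => h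
  | cons j L ih =>
    intro fs h
    simp only [List.foldl_cons]
    apply ih
    unfold foundStepB
    generalize (falseKwsB ++ trueKwsB) = ks
    induction ks generalizing fs with
    | nil => exact h
    | cons k ks ihk =>
      simp only [List.foldl_cons]
      apply ihk
      split
      · exact PySem.Set.nodup_add fs k h
      · exact h

lemma nodup_foundB (tl : List Char) : (foundB tl).Nodup := by
  exact nodup_foldl_step tl _ _ List.nodup_nil

-- every keyword is a nonempty string
lemma kws_nonempty : ∀ y ∈ falseKwsB ++ trueKwsB, y.toList ≠ [] := by decide

-- for a nonempty pattern, matching at some position below the length is substring membership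
lemma mem_foundB_iff_isIn (tl : List Char) (y : String) (hy : y ∈ falseKwsB ++ trueKwsB) :
    y ∈ foundB tl ↔ PySem.Chars.isIn y.toList tl := by
  rw [mem_foundB]
  constructor
  · rintro ⟨-, i, -, hp⟩
    exact (PySem.Chars.exists_prefix_drop_iff_isIn _ _).mp
      ⟨i, (PySem.Chars.startswith_iff _ _).mp hp⟩
  · intro h
    obtain ⟨j, hj⟩ := (PySem.Chars.exists_prefix_drop_iff_isIn _ _).mpr h
    have hlen : 0 < y.toList.length := List.length_pos_iff.mpr (kws_nonempty y hy)
    have hle : y.toList.length ≤ (tl.drop j).length := hj.length_le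
    have hjlt : j < tl.length := by
      simp only [List.length_drop] at hle
      omega
    exact ⟨hy, j, hjlt, (PySem.Chars.startswith_iff _ _).mpr hj⟩

-- the intersection size equals the number of hint-list keywords occurring in the text
lemma len_inter_eq (tl : List Char) (l : List String) (hsub : ∀ x ∈ l, x ∈ falseKwsB ++ trueKwsB)
    (hnd : l.Nodup) :
    PySem.Set.len (PySem.Set.inter (foundB tl) (PySem.Set.ofList l))
      = ((l.countP (fun kw => PySem.Chars.isIn kw.toList tl) : Nat) : Int) := by
  have hperm : (PySem.Set.inter (foundB tl) (PySem.Set.ofList l)).Perm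
      (l.filter (fun kw => PySem.Chars.isIn kw.toList tl)) := by
    rw [List.perm_ext_iff_of_nodup
      (PySem.Set.nodup_inter _ _ (nodup_foundB tl)) (hnd.filter _)]
    intro x
    rw [PySem.Set.mem_inter, PySem.Set.mem_ofList, List.mem_filter]
    constructor
    · rintro ⟨hf, hl⟩
      exact ⟨hl, (mem_foundB_iff_isIn tl x (hsub x hl)).mp hf⟩
    · rintro ⟨hl, hin⟩
      exact ⟨(mem_foundB_iff_isIn tl x (hsub x hl)).mpr hin, hl⟩
  simp only [PySem.Set.len, hperm.length_eq, List.countP_eq_length_filter]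

-- A's 0/1 accumulation over a hint list is that same count
lemma score_eq (tl : List Char) (l : List String) :
    l.foldl (fun acc kw => acc + if PySem.Chars.isIn kw.toList tl then 1 else 0) (0 : Int)
      = ((l.countP (fun kw => PySem.Chars.isIn kw.toList tl) : Nat) : Int) := by
  have hfun : (fun (acc : Int) (kw : String) => acc + if PySem.Chars.isIn kw.toList tl then 1 else 0)
      = (fun (acc : Int) (kw : String) => if PySem.Chars.isIn kw.toList tl then acc + 1 else acc) := by
    funext acc kw; split <;> simp
  rw [hfun, PySem.List.foldl_count_if]
  simp

-- the two concrete keyword collections coincide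
lemma falseHintsA_eq : (falseHintsA : List String) = falseKwsB := by decide
lemma trueHintsA_eq : (trueHintsA : List String) = trueKwsB := by decide

-- ===== VERDICT (by name: the statement is the Claim_ definition above) =====
theorem keyword_stance_py_spec : Claim_equal_keyword_stance_py := by
  intro text _
  unfold Spec_keyword_stance_py keyword_stance_py keyword_stance_py_alt
  simp only [falseHintsA_eq, trueHintsA_eq]
  have hisin : ∀ (kw : String), PySem.Str.isIn kw (PySem.Str.lower text)
      = PySem.Chars.isIn kw.toList (PySem.Str.lower text).toList := by
    intro kw; simp [PySem.Str.isIn]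
  simp only [hisin]
  rw [score_eq, score_eq,
      len_inter_eq _ _ (fun x hx => List.mem_append_left _ hx) (by decide),
      len_inter_eq _ _ (fun x hx => List.mem_append_right _ hx) (by decide)]
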